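-- pv_equiv track=rewrite | github.com/lanl/QAOA_vs_QA | create_horizontal_heavy_hex_Pegasus_embeddings.py | get_pegasus_cell_coordinates_horizontal_heavy_hex_version3
-- ===== SOURCE A (Python) =====
-- from itertools import cycle
--
-- def get_pegasus_cell_coordinates_horizontal_heavy_hex_version3(N, initial_cell):
-- 	new_cells = [initial_cell]
-- 	if initial_cell[0] == 2:
-- 		pool = cycle([1, 0, 2])
-- 	elif initial_cell[0] == 1:
-- 		pool = cycle([0, 2, 1])
-- 	elif initial_cell[0] == 0:
-- 		pool = cycle([2, 1, 0])
-- 	index_zero_list = [next(pool) for a in range(N)]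
--
-- 	index_two_list = []
-- 	MOD = initial_cell[2]%2
-- 	assert MOD==0, "To make things simple, we enfore that the first coordinate has an even number in the 3rd index coordinate"
-- 	offset = initial_cell[2]
-- 	while len(index_two_list) < N:
-- 		if MOD == 0:
-- 			index_two_list.append(offset+1)
-- 			index_two_list.append(offset+1)
-- 			MOD = 1
-- 		elif MOD == 1:
-- 			index_two_list.append(offset+1)
-- 			MOD = 0
-- 		offset = offset+1
--
-- 	index_one_list = []
-- 	offset = initial_cell[1]
-- 	COUNT = 0
-- 	while len(index_one_list) < N:
-- 		COUNT += 1
-- 		if COUNT == 1: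
-- 			index_one_list.append(offset)
-- 			index_one_list.append(offset)
-- 		else:
-- 			index_one_list.append(offset)
-- 			index_one_list.append(offset)
-- 			index_one_list.append(offset)
-- 		offset += 1
--
-- 	for i in range(N-1):
-- 		new_cells.append((index_zero_list[i], index_one_list[i], index_two_list[i]))
-- 	return new_cells
-- ===== SOURCE B (Python) =====
-- def get_pegasus_cell_coordinates_horizontal_heavy_hex_version3(N, initial_cell):
--     c0, c1, c2 = initial_cell
--     assert c2 % 2 == 0, "To make things simple, we enfore that the first coordinate has an even number in the 3rd index coordinate"
--     pattern = {2: (1, 0, 2), 1: (0, 2, 1), 0: (2, 1, 0)}.get(c0)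
--     cells = [initial_cell]
--     for i in range(N - 1):
--         k, r = divmod(i, 3)
--         cells.append((pattern[r],
--                       c1 if i < 2 else c1 + 1 + (i - 2) // 3,
--                       c2 + 2 * k + 1 + (1 if r == 2 else 0)))
--     return cells
-- ===== Notes on version B (the rewrite author's own statement) =====
-- stated objective: simpler
-- what changed: Replaced the cycle generator, the two stateful while-loops that pre-build full coordinate lists, and the final assembly pass by a single loop that computes each cell's three coordinates directly with closed-form arithmetic (pattern[i%3], divmod-based offsets).
import Mathlib
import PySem

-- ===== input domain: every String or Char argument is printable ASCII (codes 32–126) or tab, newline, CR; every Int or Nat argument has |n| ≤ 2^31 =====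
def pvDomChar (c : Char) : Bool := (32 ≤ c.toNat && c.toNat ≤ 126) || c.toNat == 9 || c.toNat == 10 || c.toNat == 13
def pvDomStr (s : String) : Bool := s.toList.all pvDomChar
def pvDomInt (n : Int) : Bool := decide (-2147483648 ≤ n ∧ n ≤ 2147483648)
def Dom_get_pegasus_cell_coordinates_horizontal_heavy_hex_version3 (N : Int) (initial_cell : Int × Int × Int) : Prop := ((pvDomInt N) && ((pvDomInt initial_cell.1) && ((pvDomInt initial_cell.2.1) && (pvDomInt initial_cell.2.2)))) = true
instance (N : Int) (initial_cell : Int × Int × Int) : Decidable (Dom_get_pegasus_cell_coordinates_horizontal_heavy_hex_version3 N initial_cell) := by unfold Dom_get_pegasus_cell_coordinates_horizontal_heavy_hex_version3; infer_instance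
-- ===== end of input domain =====

-- ===== PORT A =====
-- B replaces A's cycle generator, two while-loops and assembly pass by one loop with closed-form coordinates (objective: simpler; same O(N) cost).
-- model of itertools.cycle([a,b,c]) consumed by next n times
def pvCyc3 (a b c : Int) : Nat → List Int
  | 0 => []
  | n+1 => a :: pvCyc3 b c a n

-- the index_two_list while loop; fuel = N.toNat suffices (each iteration appends ≥ 1 element)
def pvTwoLoop (fuel : Nat) (need : Int) (MOD offset : Int) (acc : List Int) : List Int :=
  match fuel with
  | 0 => acc
  | f+1 =>
    if (acc.length : Int) < need then
      if MOD = 0 then pvTwoLoop f need 1 (offset+1) (acc ++ [offset+1, offset+1])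
      else pvTwoLoop f need 0 (offset+1) (acc ++ [offset+1])
    else acc

-- the index_one_list while loop
def pvOneLoop (fuel : Nat) (need : Int) (COUNT offset : Int) (acc : List Int) : List Int :=
  match fuel with
  | 0 => acc
  | f+1 =>
    if (acc.length : Int) < need then
      if COUNT + 1 = 1 then pvOneLoop f need (COUNT+1) (offset+1) (acc ++ [offset, offset])
      else pvOneLoop f need (COUNT+1) (offset+1) (acc ++ [offset, offset, offset])
    else acc

def get_pegasus_cell_coordinates_horizontal_heavy_hex_version3 (N : Int) (initial_cell : Int × Int × Int) : List (Int × Int × Int) :=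
  let new_cells := [initial_cell]
  -- pool: none models the undefined `pool` (Python NameError once next() is called, i.e. N ≥ 1; excluded by Pre_)
  let pool : Option (Int × Int × Int) :=
    if initial_cell.1 = 2 then some (1, 0, 2)
    else if initial_cell.1 = 1 then some (0, 2, 1)
    else if initial_cell.1 = 0 then some (2, 1, 0)
    else none
  let index_zero_list : List Int :=
    match pool with
    | some (a, b, c) => pvCyc3 a b c N.toNat
    | none => []
  -- assert MOD == 0 raises AssertionError on odd third coordinate; excluded by Pre_
  let index_two_list := pvTwoLoop N.toNat N (initial_cell.2.2 % 2) initial_cell.2.2 []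
  let index_one_list := pvOneLoop N.toNat N 0 initial_cell.2.1 []
  -- Python indexing here is always in range under Pre_, so getD's default is never used
  (List.range (N - 1).toNat).foldl
    (fun cells i => cells ++ [(index_zero_list.getD i 0, index_one_list.getD i 0, index_two_list.getD i 0)])
    new_cells

-- ===== PORT B =====
def get_pegasus_cell_coordinates_horizontal_heavy_hex_version3_alt (N : Int) (initial_cell : Int × Int × Int) : List (Int × Int × Int) :=
  let c0 := initial_cell.1
  let c1 := initial_cell.2.1
  let c2 := initial_cell.2.2
  -- Source B's assert on an odd third coordinate raises AssertionError there (outside Pre_, where this port's value is not claimed)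
  -- dict .get: none for an invalid first coordinate (Source B then raises for N ≥ 2, outside Pre_)
  let pattern : Option (Int × Int × Int) :=
    if c0 = 2 then some (1, 0, 2)
    else if c0 = 1 then some (0, 2, 1)
    else if c0 = 0 then some (2, 1, 0)
    else none
  initial_cell :: (List.range (N - 1).toNat).map (fun (i : Nat) =>
    let k : Int := (i : Int) / 3
    let r : Int := (i : Int) % 3
    let p : Int := (pattern.map (fun t => if r = 0 then t.1 else if r = 1 then t.2.1 else t.2.2)).getD 0
    (p,
     if (i : Int) < 2 then c1 else c1 + 1 + ((i : Int) - 2) / 3,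
     c2 + 2 * k + 1 + (if r = 2 then 1 else 0)))

-- ===== PRECONDITION & SPEC =====
-- Pre_ excludes exactly the inputs where A raises: an odd third coordinate (AssertionError from the
-- assert) and, for N ≥ 1, a first coordinate outside {0,1,2} (NameError: `pool` never defined).
def Pre_get_pegasus_cell_coordinates_horizontal_heavy_hex_version3 (N : Int) (initial_cell : Int × Int × Int) : Prop :=
  initial_cell.2.2 % 2 = 0 ∧ (1 ≤ N → initial_cell.1 = 0 ∨ initial_cell.1 = 1 ∨ initial_cell.1 = 2)
instance (N : Int) (initial_cell : Int × Int × Int) : Decidable (Pre_get_pegasus_cell_coordinates_horizontal_heavy_hex_version3 N initial_cell) := by unfold Pre_get_pegasus_cell_coordinates_horizontal_heavy_hex_version3; infer_instance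

def pvWitness_get_pegasus_cell_coordinates_horizontal_heavy_hex_version3 : Int × (Int × Int × Int) := (4, (2, 0, 0))

def Spec_get_pegasus_cell_coordinates_horizontal_heavy_hex_version3 (N : Int) (initial_cell : Int × Int × Int) (out : List (Int × Int × Int)) : Prop := out = get_pegasus_cell_coordinates_horizontal_heavy_hex_version3_alt N initial_cell
instance (N : Int) (initial_cell : Int × Int × Int) (out : List (Int × Int × Int)) : Decidable (Spec_get_pegasus_cell_coordinates_horizontal_heavy_hex_version3 N initial_cell out) := by unfold Spec_get_pegasus_cell_coordinates_horizontal_heavy_hex_version3; infer_instance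

-- ===== CLAIM (what is proved, stated in full; the proofs are below) =====
def Claim_equal_get_pegasus_cell_coordinates_horizontal_heavy_hex_version3 : Prop := ∀ (N : Int) (initial_cell : Int × Int × Int), Dom_get_pegasus_cell_coordinates_horizontal_heavy_hex_version3 N initial_cell → Pre_get_pegasus_cell_coordinates_horizontal_heavy_hex_version3 N initial_cell → Spec_get_pegasus_cell_coordinates_horizontal_heavy_hex_version3 N initial_cell (get_pegasus_cell_coordinates_horizontal_heavy_hex_version3 N initial_cell)

-- ===== LEMMAS AND PROOFS =====

lemma pvCyc3_getD : ∀ (n : Nat) (a b c : Int) (i : Nat), i < n →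
    (pvCyc3 a b c n).getD i 0 = [a, b, c].getD (i % 3) 0 := by
  intro n
  induction n with
  | zero => intro a b c i h; omega
  | succ n ih =>
    intro a b c i h
    match i with
    | 0 => simp [pvCyc3]
    | i+1 =>
      have h' : i < n := by omega
      have hrec := ih b c a i h'
      simp only [pvCyc3, List.getD_cons_succ]
      rw [hrec]
      rcases (show i % 3 = 0 ∧ (i+1) % 3 = 1 ∨ i % 3 = 1 ∧ (i+1) % 3 = 2 ∨ i % 3 = 2 ∧ (i+1) % 3 = 0 by omega) with ⟨h3, h4⟩ | ⟨h3, h4⟩ | ⟨h3, h4⟩ <;>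
        rw [h3, h4] <;> rfl

lemma pvTwoLoop_prefix : ∀ (f : Nat) (need MOD off : Int) (acc : List Int) (i : Nat), i < acc.length →
    (pvTwoLoop f need MOD off acc).getD i 0 = acc.getD i 0 := by
  intro f
  induction f with
  | zero => intro _ _ _ _ _ _; simp [pvTwoLoop]
  | succ f ih =>
    intro need MOD off acc i h
    simp only [pvTwoLoop]
    split_ifs with h1 h2
    · rw [ih _ _ _ _ _ (by simp; omega)]
      exact List.getD_append _ _ _ _ h
    · rw [ih _ _ _ _ _ (by simp; omega)]
      exact List.getD_append _ _ _ _ h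
    · rfl

lemma pvOneLoop_prefix : ∀ (f : Nat) (need COUNT off : Int) (acc : List Int) (i : Nat), i < acc.length →
    (pvOneLoop f need COUNT off acc).getD i 0 = acc.getD i 0 := by
  intro f
  induction f with
  | zero => intro _ _ _ _ _ _; simp [pvOneLoop]
  | succ f ih =>
    intro need COUNT off acc i h
    simp only [pvOneLoop]
    split_ifs with h1 h2
    · rw [ih _ _ _ _ _ (by simp; omega)]
      exact List.getD_append _ _ _ _ h
    · rw [ih _ _ _ _ _ (by simp; omega)]
      exact List.getD_append _ _ _ _ h
    · rfl

lemma pvTwoLoop_getD : ∀ (f : Nat) (need c2 MOD off : Int) (acc : List Int) (t i : Nat),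
    ((MOD = 0 ∧ acc.length = 3*t ∧ off = c2 + 2*t) ∨ (MOD = 1 ∧ acc.length = 3*t+2 ∧ off = c2 + 2*t + 1)) →
    acc.length ≤ i → (i : Int) < need → need ≤ (acc.length : Int) + f →
    (pvTwoLoop f need MOD off acc).getD i 0 = c2 + 2*(↑(i/3) : Int) + 1 + (if i % 3 = 2 then 1 else 0) := by
  intro f
  induction f with
  | zero => intro need c2 MOD off acc t i _ h1 h2 h3; exfalso; omega
  | succ f ih =>
    intro need c2 MOD off acc t i hinv h1 h2 h3
    simp only [pvTwoLoop]
    have hlt : (acc.length : Int) < need := by omega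
    rw [if_pos hlt]
    rcases hinv with ⟨hm, hl, ho⟩ | ⟨hm, hl, ho⟩
    · rw [if_pos hm]
      by_cases hi : i < acc.length + 2
      · rw [pvTwoLoop_prefix f need 1 (off+1) _ i (by simp; omega)]
        rw [List.getD_append_right _ _ _ _ h1]
        have hval : [off+1, off+1].getD (i - acc.length) 0 = off + 1 := by
          rcases (show i - acc.length = 0 ∨ i - acc.length = 1 by omega) with h | h <;> rw [h] <;> rfl
        rw [hval]
        have d1 : (↑(i/3) : Int) = ↑t := by omega
        have d2 : i % 3 ≠ 2 := by omega
        rw [if_neg d2, d1]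
        omega
      · rw [ih need c2 1 (off+1) _ t i (Or.inr ⟨rfl, by simp only [List.length_append, List.length_cons, List.length_nil]; omega, by omega⟩) (by simp; omega) h2 (by simp; omega)]
    · rw [if_neg (by omega)]
      by_cases hi : i < acc.length + 1
      · rw [pvTwoLoop_prefix f need 0 (off+1) _ i (by simp; omega)]
        rw [List.getD_append_right _ _ _ _ h1]
        have h0 : i - acc.length = 0 := by omega
        rw [h0]
        have d1 : (↑(i/3) : Int) = ↑t := by omega
        have d2 : i % 3 = 2 := by omega
        rw [if_pos d2, d1]
        show off + 1 = _
        omega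
      · rw [ih need c2 0 (off+1) _ (t+1) i (Or.inl ⟨rfl, by simp only [List.length_append, List.length_cons, List.length_nil]; omega, by push_cast; omega⟩) (by simp; omega) h2 (by simp; omega)]

lemma pvOneLoop_getD : ∀ (f : Nat) (need c1 COUNT off : Int) (acc : List Int) (t i : Nat),
    ((COUNT = 0 ∧ acc.length = 0 ∧ off = c1) ∨ (1 ≤ COUNT ∧ acc.length = 3*t+2 ∧ off = c1 + 1 + t)) →
    acc.length ≤ i → (i : Int) < need → need ≤ (acc.length : Int) + f →
    (pvOneLoop f need COUNT off acc).getD i 0 =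
      (if i < 2 then c1 else c1 + 1 + (↑((i-2)/3) : Int)) := by
  intro f
  induction f with
  | zero => intro need c1 COUNT off acc t i _ h1 h2 h3; exfalso; omega
  | succ f ih =>
    intro need c1 COUNT off acc t i hinv h1 h2 h3
    simp only [pvOneLoop]
    have hlt : (acc.length : Int) < need := by omega
    rw [if_pos hlt]
    rcases hinv with ⟨hm, hl, ho⟩ | ⟨hm, hl, ho⟩
    · rw [if_pos (by omega)]
      by_cases hi : i < acc.length + 2
      · rw [pvOneLoop_prefix f need (COUNT+1) (off+1) _ i (by simp; omega)]
        rw [List.getD_append_right _ _ _ _ h1]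
        have hval : [off, off].getD (i - acc.length) 0 = off := by
          rcases (show i - acc.length = 0 ∨ i - acc.length = 1 by omega) with h | h <;> rw [h] <;> rfl
        rw [hval, if_pos (show i < 2 by omega)]
        omega
      · rw [ih need c1 (COUNT+1) (off+1) _ 0 i (Or.inr ⟨by omega, by simp only [List.length_append, List.length_cons, List.length_nil]; omega, by omega⟩) (by simp; omega) h2 (by simp; omega)]
    · rw [if_neg (by omega)]
      by_cases hi : i < acc.length + 3
      · rw [pvOneLoop_prefix f need (COUNT+1) (off+1) _ i (by simp; omega)]
        rw [List.getD_append_right _ _ _ _ h1]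
        have hval : [off, off, off].getD (i - acc.length) 0 = off := by
          rcases (show i - acc.length = 0 ∨ i - acc.length = 1 ∨ i - acc.length = 2 by omega) with h | h | h <;> rw [h] <;> rfl
        rw [hval, if_neg (show ¬ i < 2 by omega)]
        have d1 : (↑((i-2)/3) : Int) = ↑t := by omega
        rw [d1]
        omega
      · rw [ih need c1 (COUNT+1) (off+1) _ (t+1) i (Or.inr ⟨by omega, by simp only [List.length_append, List.length_cons, List.length_nil]; omega, by push_cast; omega⟩) (by simp; omega) h2 (by simp; omega)]

lemma pvFoldl_append_map {α β : Type} : ∀ (l : List α) (init : List β) (g : α → β),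
    l.foldl (fun a x => a ++ [g x]) init = init ++ l.map g := by
  intro l
  induction l with
  | nil => intro init g; simp
  | cons x xs ih => intro init g; simp [List.foldl_cons, ih]

-- ===== VERDICT (by name: the statement is the Claim_ definition above) =====
theorem get_pegasus_cell_coordinates_horizontal_heavy_hex_version3_spec : Claim_equal_get_pegasus_cell_coordinates_horizontal_heavy_hex_version3 := by
  intro N ic _ hpre
  obtain ⟨heven, hvalid⟩ := hpre
  unfold Spec_get_pegasus_cell_coordinates_horizontal_heavy_hex_version3
  unfold get_pegasus_cell_coordinates_horizontal_heavy_hex_version3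
  unfold get_pegasus_cell_coordinates_horizontal_heavy_hex_version3_alt
  rw [pvFoldl_append_map]
  simp only [List.singleton_append, List.cons.injEq, true_and]
  apply List.map_congr_left
  intro i hi
  rw [List.mem_range] at hi
  have hN1 : (i : Int) < N - 1 := by omega
  have hN : 1 ≤ N := by omega
  have hc0 := hvalid hN
  have hiN : (i : Int) < N := by omega
  have hone := pvOneLoop_getD N.toNat N ic.2.1 0 ic.2.1 [] 0 i (Or.inl ⟨rfl, rfl, rfl⟩) (by simp) hiN (by simp only [List.length_nil, Nat.cast_zero]; omega)
  have htwo := pvTwoLoop_getD N.toNat N ic.2.2 (ic.2.2 % 2) ic.2.2 [] 0 i (Or.inl ⟨heven, rfl, by omega⟩) (by simp) hiN (by simp only [List.length_nil, Nat.cast_zero]; omega)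
  have hiN' : i < N.toNat := by omega
  have hmod : (i : Int) % 3 = ↑(i % 3) := by omega
  have hdiv : (i : Int) / 3 = ↑(i / 3) := by omega
  rcases hc0 with h0 | h0 | h0 <;>
    · simp only [h0, Int.reduceEq, reduceIte, Option.map_some, Option.getD_some, Prod.mk.injEq]
      refine ⟨?_, ?_, ?_⟩
      · rw [pvCyc3_getD _ _ _ _ _ hiN', hmod]
        rcases (show i % 3 = 0 ∨ i % 3 = 1 ∨ i % 3 = 2 by omega) with h3 | h3 | h3 <;> rw [h3] <;> rfl
      · rw [hone]
        split_ifs with ha hb hb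
        · rfl
        · omega
        · omega
        · have h5 : (↑((i-2)/3) : Int) = ((i : Int) - 2) / 3 := by omega
          rw [h5]
      · rw [htwo, hdiv]
        split_ifs with ha hb hb
        · rfl
        · omega
        · omega
        · rfl
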